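-- pv_equiv track=rewrite | github.com/tonygous/web_appKB | main.py | _build_index_markdown
-- ===== SOURCE A (Python) =====
-- from typing import List
--
-- def _build_index_markdown(pages: List) -> str:
--     grouped = _group_pages_by_host(pages)
--     lines = ["# Index", ""]
--     for host in sorted(grouped.keys()):
--         lines.append(f"## {host}")
--         for page in grouped[host]:
--             filename = page.get("filename", "")
--             title = page.get("title") or page.get("path") or page.get("url") or filename
--             if filename:
--                 lines.append(f"- [{title}]({filename})")
--         lines.append("")
--     return "\n".join(lines).strip() + "\n"
--
-- def _group_pages_by_host(pages: List) -> dict: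
--     grouped: dict = {}
--     for page in pages:
--         host = page.get("host") if isinstance(page, dict) else getattr(page, "host", "")
--         grouped.setdefault(host or "", []).append(page)
--     return grouped
-- ===== SOURCE B (Python) =====
-- def _build_index_markdown(pages):
--     def host(p):
--         return p.get("host") or ""
--
--     def entry(p):
--         fn = p.get("filename", "")
--         if not fn:
--             return None
--         title = next((v for v in (p.get(k) for k in ("title", "path", "url")) if v), fn)
--         return f"- [{title}]({fn})"
--
--     sections = [
--         ["## " + h]
--         + [e for e in (entry(p) for p in pages if host(p) == h) if e is not None]
--         + [""]
--         for h in sorted({host(p) for p in pages})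
--     ]
--     lines = ["# Index", ""] + [ln for sec in sections for ln in sec]
--     return "\n".join(lines).strip() + "\n"
-- ===== Notes on version B (the rewrite author's own statement) =====
-- stated objective: alternative
-- what changed: Replaces A's host->pages grouping dict and nested accumulator folds with a functional pipeline: sorted distinct hosts mapped to whole rendered sections (stable filter + filterMap of optional entries) and flattened, with the title fallback chain expressed as first-truthy-of-keys lookup.
import Mathlib
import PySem

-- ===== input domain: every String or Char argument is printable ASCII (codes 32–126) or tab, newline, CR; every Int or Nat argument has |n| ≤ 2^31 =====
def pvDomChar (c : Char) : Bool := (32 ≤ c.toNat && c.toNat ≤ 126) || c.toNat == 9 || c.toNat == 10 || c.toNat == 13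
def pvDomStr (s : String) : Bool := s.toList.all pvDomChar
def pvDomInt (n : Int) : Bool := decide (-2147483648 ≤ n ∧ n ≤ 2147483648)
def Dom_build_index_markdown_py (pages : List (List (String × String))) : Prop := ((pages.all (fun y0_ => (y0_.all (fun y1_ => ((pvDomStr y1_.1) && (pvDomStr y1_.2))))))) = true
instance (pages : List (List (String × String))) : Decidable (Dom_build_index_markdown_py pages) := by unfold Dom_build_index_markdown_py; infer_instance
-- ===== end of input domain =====

-- B drops A's host->pages grouping dict entirely: it maps the sorted distinct hosts to
-- whole rendered sections (filter + filterMap + flatten pipeline) instead of A's nested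
-- accumulator folds over a dict — alternative decomposition, identical results.


-- ===== PORT A =====
-- `(page.get("host") if isinstance(page, dict) else getattr(page, "host", "")) or ""` (pages are dicts here)
def pvHostA (page : List (String × String)) : String :=
  match (PySem.Dict.mk page).get? "host" with
  | some h => if h = "" then "" else h
  | none => ""

-- inner loop body of A: filename = page.get("filename",""); title = get("title") or get("path") or get("url") or filename; append when filename truthy
def pvEmitA (lines : List String) (page : List (String × String)) : List String :=
  let filename := (PySem.Dict.mk page).getD "filename" ""
  let t := ((PySem.Dict.mk page).get? "title").getD ""
  let pa := ((PySem.Dict.mk page).get? "path").getD ""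
  let u := ((PySem.Dict.mk page).get? "url").getD ""
  let title := if t ≠ "" then t else if pa ≠ "" then pa else if u ≠ "" then u else filename
  if filename ≠ "" then lines ++ ["- [" ++ title ++ "](" ++ filename ++ ")"] else lines

-- the helper `_group_pages_by_host`: grouped.setdefault(host or "", []).append(page)
def pvGroupA (pages : List (List (String × String))) : PySem.Dict String (List (List (String × String))) :=
  pages.foldl (fun g p => g.modify (pvHostA p) [] (· ++ [p])) PySem.Dict.empty

def build_index_markdown_py (pages : List (List (String × String))) : String :=
  -- host ranges over grouped's keys, so grouped[host] never raises; getD is exact here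
  PySem.Str.strip (PySem.Str.join "\n"
    ((PySem.List.sorted (pvGroupA pages).keys (fun h => h) false).foldl
      (fun ls host => ((pvGroupA pages).getD host []).foldl pvEmitA (ls ++ ["## " ++ host]) ++ [""])
      ["# Index", ""])) ++ "\n"

-- ===== PORT B =====
-- Source B's host(): `p.get("host") or ""` — None and "" both collapse to "", so getD "" is exact
def pvHostB (p : List (String × String)) : String :=
  ((PySem.Dict.mk p).get? "host").getD ""

-- Source B's entry(): None unless filename is truthy; title = first truthy of title/path/url, else fn
def pvEntryB (p : List (String × String)) : Option String :=
  let fn := (PySem.Dict.mk p).getD "filename" ""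
  if fn = "" then none
  else
    let title := (["title", "path", "url"].findSome? (fun k =>
      match (PySem.Dict.mk p).get? k with
      | some v => if v = "" then none else some v
      | none => none)).getD fn
    some ("- [" ++ title ++ "](" ++ fn ++ ")")

def build_index_markdown_py_alt (pages : List (List (String × String))) : String :=
  let hosts := PySem.List.sorted (PySem.Set.ofList (pages.map pvHostB)) (fun h => h) false
  let sections := hosts.map (fun h =>
    ["## " ++ h] ++ (pages.filter (fun p => pvHostB p == h)).filterMap pvEntryB ++ [""])
  PySem.Str.strip (PySem.Str.join "\n" (["# Index", ""] ++ sections.flatten)) ++ "\n"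

-- ===== PRECONDITION & SPEC =====
def Spec_build_index_markdown_py (pages : List (List (String × String))) (out : String) : Prop := out = build_index_markdown_py_alt pages
instance (pages : List (List (String × String))) (out : String) : Decidable (Spec_build_index_markdown_py pages out) := by unfold Spec_build_index_markdown_py; infer_instance

-- ===== CLAIM (what is proved, stated in full; the proofs are below) =====
def Claim_equal_build_index_markdown_py : Prop := ∀ (pages : List (List (String × String))), Dom_build_index_markdown_py pages → Spec_build_index_markdown_py pages (build_index_markdown_py pages)

-- ===== LEMMAS AND PROOFS =====

theorem pvHostB_eq : pvHostB = pvHostA := by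
  funext p
  simp only [pvHostA, pvHostB]
  cases h : (PySem.Dict.mk p).get? "host" with
  | none => rfl
  | some v => by_cases hv : v = "" <;> simp [hv]

-- A's emit step appends exactly B's optional rendered entry.
theorem pvEmitA_eq_entry (out : List String) (p : List (String × String)) :
    pvEmitA out p = out ++ (pvEntryB p).toList := by
  simp only [pvEmitA, pvEntryB, List.findSome?]
  by_cases hfn : (PySem.Dict.mk p).getD "filename" "" = ""
  · simp [hfn]
  · cases ht : (PySem.Dict.mk p).get? "title" with
    | none =>
      cases hp : (PySem.Dict.mk p).get? "path" with
      | none =>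
        cases hu : (PySem.Dict.mk p).get? "url" with
        | none => simp [hfn]
        | some u => by_cases hu0 : u = "" <;> simp [hfn, hu0]
      | some pa => by_cases hp0 : pa = "" <;>
          [skip; simp [hfn, hp0]] <;>
          (subst hp0
           cases hu : (PySem.Dict.mk p).get? "url" with
           | none => simp [hfn]
           | some u => by_cases hu0 : u = "" <;> simp [hfn, hu0])
    | some t => by_cases ht0 : t = "" <;>
        [skip; simp [hfn, ht0]] <;>
        (subst ht0
         cases hp : (PySem.Dict.mk p).get? "path" with
         | none =>
           cases hu : (PySem.Dict.mk p).get? "url" with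
           | none => simp [hfn]
           | some u => by_cases hu0 : u = "" <;> simp [hfn, hu0]
         | some pa => by_cases hp0 : pa = "" <;>
             [skip; simp [hfn, hp0]] <;>
             (subst hp0
              cases hu : (PySem.Dict.mk p).get? "url" with
              | none => simp [hfn]
              | some u => by_cases hu0 : u = "" <;> simp [hfn, hu0]))

-- A's grouping dict, looked up at a host, is exactly the stable filter of pages by that host.
theorem pvGroupA_getD_acc (pages : List (List (String × String)))
    (d : PySem.Dict String (List (List (String × String)))) (h : String) :
    (pages.foldl (fun g p => g.modify (pvHostA p) [] (· ++ [p])) d).getD h []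
      = d.getD h [] ++ pages.filter (fun p => pvHostA p == h) := by
  induction pages generalizing d with
  | nil => simp
  | cons p ps ih =>
    simp only [List.foldl_cons, List.filter_cons, ih]
    by_cases hp : pvHostA p = h
    · subst hp; simp [PySem.Dict.getD_modify_self]
    · simp [PySem.Dict.getD_modify, (Ne.symm hp : h ≠ pvHostA p), hp]

theorem pvGroupA_getD (pages : List (List (String × String))) (h : String) :
    (pvGroupA pages).getD h [] = pages.filter (fun p => pvHostA p == h) := by
  rw [pvGroupA, pvGroupA_getD_acc]
  simp

-- A's grouping dict has exactly the distinct hosts as keys, in first-occurrence order.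
theorem pvGroupA_keys (pages : List (List (String × String))) :
    (pvGroupA pages).keys = PySem.Set.ofList (pages.map pvHostA) := by
  rw [pvGroupA,
    PySem.Dict.keys_foldl_modify_key pages pvHostA [] (fun g p => (· ++ [p])) PySem.Dict.empty]
  rfl

-- A's inner emit fold over a group equals appending B's filterMap of that group.
theorem pvInner_eq (l : List (List (String × String))) (out : List String) :
    l.foldl pvEmitA out = out ++ l.filterMap pvEntryB := by
  induction l generalizing out with
  | nil => simp
  | cons p ps ih =>
    simp only [List.foldl_cons, List.filterMap_cons, pvEmitA_eq_entry]
    cases pvEntryB p <;> simp [ih]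

-- A's outer host fold equals appending B's flattened sections.
theorem pvOuter_eq (pages : List (List (String × String))) (hosts : List String)
    (init : List String) :
    hosts.foldl
      (fun ls host => ((pvGroupA pages).getD host []).foldl pvEmitA (ls ++ ["## " ++ host]) ++ [""])
      init
      = init ++ (hosts.map (fun h =>
          ["## " ++ h] ++ (pages.filter (fun p => pvHostA p == h)).filterMap pvEntryB ++ [""])).flatten := by
  induction hosts generalizing init with
  | nil => simp
  | cons h hs ih =>
    rw [List.foldl_cons, ih]
    simp [pvGroupA_getD, pvInner_eq]

-- ===== VERDICT (by name: the statement is the Claim_ definition above) =====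
theorem build_index_markdown_py_spec : Claim_equal_build_index_markdown_py := by
  intro pages _
  unfold Spec_build_index_markdown_py build_index_markdown_py build_index_markdown_py_alt
  rw [pvHostB_eq, pvGroupA_keys, pvOuter_eq]
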